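-- pv_equiv track=rewrite | github.com/DonggyuJin/cote_study | 프로그래머스/완전탐색/모의고사.py | solution
-- ===== SOURCE A (Python) =====
-- def solution(answers):
--     answer = []
--
--     one = [1,2,3,4,5] * 2000
--     two = [2,1,2,3,2,4,2,5] * 1250
--     three = [3,3,1,1,2,2,4,4,5,5] * 1000
--
--     a,b,c=0,0,0
--
--     for i in range(len(answers)):
--         if answers[i] == one[i]: a+=1
--         if answers[i] == two[i]: b+=1
--         if answers[i] == three[i]: c+=1
--
--     m = max(a,b,c)
--
--     if m == a and m == b and m == c: answer = [1, 2, 3]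
--     elif m == a and m == b and m != c: answer = [1, 2]
--     elif m == a and m != b and m == c: answer = [1, 3]
--     elif m != a and m == b and m == c: answer = [2, 3]
--     elif m == a: answer = [1]
--     elif m == b: answer = [2]
--     elif m == c: answer = [3]
--
--     return answer
-- ===== SOURCE B (Python) =====
-- def solution(answers):
--     # Bucket pass: histogram of (position mod 40, answer value); 40 = lcm of the
--     # three cycle lengths, so each pattern's score is a 40-entry table lookup sum.
--     hist = {}
--     for i, a in enumerate(answers):
--         key = (i % 40, a)
--         hist[key] = hist.get(key, 0) + 1
--     patterns = [[1, 2, 3, 4, 5], [2, 1, 2, 3, 2, 4, 2, 5], [3, 3, 1, 1, 2, 2, 4, 4, 5, 5]]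
--     scores = [sum(hist.get((r, p[r % len(p)]), 0) for r in range(40)) for p in patterns]
--     best = max(scores)
--     return [k for k in (1, 2, 3) if scores[k - 1] == best]
-- ===== Notes on version B (the rewrite author's own statement) =====
-- stated objective: alternative
-- what changed: A materializes three 10000-element repeated answer lists and compares every position against all three in one interleaved loop, then picks winners with a 7-way if/elif cascade; B makes a single histogram pass over the answers keyed by (index mod 40, value) (40 = lcm of the cycle lengths) and computes each pattern's score as a 40-entry table-lookup sum, returning the winners as a filter of [1,2,3].
import Mathlib
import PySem

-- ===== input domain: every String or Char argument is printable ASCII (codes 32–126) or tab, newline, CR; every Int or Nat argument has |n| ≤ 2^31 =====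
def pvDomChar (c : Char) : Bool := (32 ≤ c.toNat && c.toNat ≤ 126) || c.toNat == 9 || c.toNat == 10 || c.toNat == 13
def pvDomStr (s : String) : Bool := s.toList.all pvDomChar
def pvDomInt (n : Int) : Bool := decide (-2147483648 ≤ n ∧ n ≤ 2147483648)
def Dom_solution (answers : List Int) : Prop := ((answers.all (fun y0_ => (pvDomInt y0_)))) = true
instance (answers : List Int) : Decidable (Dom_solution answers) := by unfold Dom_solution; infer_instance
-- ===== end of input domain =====

-- B replaces A's interleaved compare-loop over three materialized 10000-long lists by a single
-- histogram pass keyed (i % 40, answer) — 40 = lcm of the cycle lengths — after which each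
-- pattern's score is a 40-entry table-lookup sum; winners are a filter of [1,2,3] (objective: alternative).

-- ===== PORT A =====
-- pyGetD: under Pre_solution (answers.length ≤ 10000) every index read in the loop is in range,
-- so the default 0 is never read (beyond 10000 the Python raises IndexError; excluded by Pre_).
def solution (answers : List Int) : List Int :=
  let one : List Int := (List.replicate 2000 ([1,2,3,4,5] : List Int)).flatten
  let two : List Int := (List.replicate 1250 ([2,1,2,3,2,4,2,5] : List Int)).flatten
  let three : List Int := (List.replicate 1000 ([3,3,1,1,2,2,4,4,5,5] : List Int)).flatten
  let s :=
    (PySem.List.pyRange 0 (answers.length : Int) 1).foldl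
      (fun (s : Int × Int × Int) i =>
        (if PySem.List.pyGetD answers i 0 == PySem.List.pyGetD one i 0 then s.1 + 1 else s.1,
         if PySem.List.pyGetD answers i 0 == PySem.List.pyGetD two i 0 then s.2.1 + 1 else s.2.1,
         if PySem.List.pyGetD answers i 0 == PySem.List.pyGetD three i 0 then s.2.2 + 1 else s.2.2))
      (0, 0, 0)
  let a := s.1
  let b := s.2.1
  let c := s.2.2
  let m := max (max a b) c
  if m == a && m == b && m == c then [1, 2, 3]
  else if m == a && m == b && !(m == c) then [1, 2]
  else if m == a && !(m == b) && m == c then [1, 3]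
  else if !(m == a) && m == b && m == c then [2, 3]
  else if m == a then [1]
  else if m == b then [2]
  else if m == c then [3]
  else []

-- ===== PORT B =====
-- hist[key] = hist.get(key, 0) + 1 is the counter idiom: Dict.modify key 0 (+1).
-- p[r % len(p)] is always in range, so pyGetD's default 0 is never read.
def solution_alt (answers : List Int) : List Int :=
  let hist : PySem.Dict (Int × Int) Int :=
    (PySem.List.enumerate answers).foldl
      (fun d ia => d.modify (PySem.Int.mod ia.1 40, ia.2) 0 (fun x => x + 1))
      PySem.Dict.empty
  let patterns : List (List Int) := [[1,2,3,4,5], [2,1,2,3,2,4,2,5], [3,3,1,1,2,2,4,4,5,5]]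
  let scores := patterns.map (fun p =>
    ((PySem.List.pyRange 0 40).map
      (fun r => hist.getD (r, PySem.List.pyGetD p (PySem.Int.mod r (p.length : Int)) 0) 0)).sum)
  -- max(scores): scores is a nonempty literal list, so max? is some and the default 0 is never read.
  let best := (PySem.List.max? scores (fun x => x)).getD 0
  ([1, 2, 3] : List Int).filter (fun k => PySem.List.pyGetD scores (k - 1) 0 == best)

-- ===== PRECONDITION & SPEC =====
-- A indexes three materialized lists of length 10000 and raises IndexError when
-- len(answers) > 10000; Pre_ excludes exactly those inputs (A returns nowhere outside Pre_).
def Pre_solution (answers : List Int) : Prop := answers.length ≤ 10000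
instance (answers : List Int) : Decidable (Pre_solution answers) := by unfold Pre_solution; infer_instance
def pvWitness_solution : List Int := ([1, 2, 3] : List Int)

def Spec_solution (answers : List Int) (out : List Int) : Prop := out = solution_alt answers
instance (answers : List Int) (out : List Int) : Decidable (Spec_solution answers out) := by unfold Spec_solution; infer_instance

-- ===== CLAIM (what is proved, stated in full; the proofs are below) =====
def Claim_equal_solution : Prop := ∀ (answers : List Int), Dom_solution answers → Pre_solution answers → Spec_solution answers (solution answers)

-- ===== LEMMAS AND PROOFS =====

-- the count both programs compute for one pattern p (index j matched against p cyclically)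
def pvCnt (answers p : List Int) : Int :=
  ((List.range answers.length).countP (fun j => answers.getD j 0 == p.getD (j % p.length) 0) : Int)

-- indexing the materialized k-fold repetition of p is cyclic indexing of p
theorem getD_flatten_replicate (p : List Int) (k j : Nat) (h : j < k * p.length) :
    ((List.replicate k p).flatten.getD j 0) = p.getD (j % p.length) 0 := by
  induction k generalizing j with
  | zero => simp at h
  | succ k ih =>
    rw [List.replicate_succ, List.flatten_cons]
    by_cases hj : j < p.length
    · rw [List.getD_append _ _ _ _ hj, Nat.mod_eq_of_lt hj]
    · rw [Nat.not_lt] at hj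
      rw [Nat.succ_mul] at h
      rw [List.getD_append_right _ _ _ _ hj, ih (j - p.length) (by omega),
        Nat.mod_eq_sub_mod hj]

-- A's three interleaved counters are three independent counts
theorem triple_fold (P Q R : Int → Bool) (l : List Int) :
    l.foldl (fun (s : Int × Int × Int) i =>
        (if P i then s.1 + 1 else s.1,
         if Q i then s.2.1 + 1 else s.2.1,
         if R i then s.2.2 + 1 else s.2.2)) ((0 : Int), (0 : Int), (0 : Int))
    = ((l.countP P : Int), (l.countP Q : Int), (l.countP R : Int)) := by
  rw [PySem.List.foldl_prod_mk (f := fun (t : Int) i => if P i then t + 1 else t)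
      (g := fun (u : Int × Int) i =>
        (if Q i then u.1 + 1 else u.1, if R i then u.2 + 1 else u.2)),
    PySem.List.foldl_prod_mk (f := fun (t : Int) i => if Q i then t + 1 else t)
      (g := fun (t : Int) i => if R i then t + 1 else t),
    PySem.List.foldl_if_add_one, PySem.List.foldl_if_add_one, PySem.List.foldl_if_add_one]
  simp

-- a count over range(len(answers)) indexed through pyGetD is the cyclic count pvCnt
theorem countP_pyRange_eq_cnt (answers q p : List Int) (hq : ∀ j < answers.length, q.getD j 0 = p.getD (j % p.length) 0) :
    ((PySem.List.pyRange 0 (answers.length : Int) 1).countP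
        (fun i => PySem.List.pyGetD answers i 0 == PySem.List.pyGetD q i 0) : Int)
    = pvCnt answers p := by
  rw [PySem.List.pyRange_one, pvCnt]
  norm_num [List.countP_map]
  apply List.countP_congr
  intro j hj
  simp only [Function.comp, PySem.List.pyGetD_natCast]
  rw [hq j (List.mem_range.mp hj)]
  simp [List.getD]

-- B's histogram keys, read off positionally
def pvKeys (answers : List Int) : List (Int × Int) :=
  (List.range answers.length).map (fun j => (((j % 40 : Nat) : Int), answers.getD j 0))

-- the histogram fold reads back as a count of keys
theorem hist_getD (answers : List Int) (v : Int × Int) :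
    ((PySem.List.enumerate answers).foldl
      (fun d ia => d.modify (PySem.Int.mod ia.1 40, ia.2) 0 (fun x => x + 1))
      PySem.Dict.empty).getD v 0 = (List.count v (pvKeys answers) : Int) := by
  have h : (PySem.List.enumerate answers).foldl
      (fun d ia => d.modify (PySem.Int.mod ia.1 40, ia.2) 0 (fun x => x + 1))
      (PySem.Dict.empty : PySem.Dict (Int × Int) Int)
      = ((PySem.List.enumerate answers).map
          (fun ia => (PySem.Int.mod ia.1 40, ia.2))).foldl
          (fun d k => d.modify k 0 (fun x => x + 1)) PySem.Dict.empty := by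
    rw [List.foldl_map]
  rw [h, PySem.Dict.getD_foldl_modify_add_one, PySem.Dict.getD_empty]
  have hk : (PySem.List.enumerate answers).map (fun ia => (PySem.Int.mod ia.1 40, ia.2))
      = pvKeys answers := by
    rw [PySem.List.enumerate_eq_map_pyRange answers 0, PySem.List.len_eq,
      PySem.List.pyRange_zero_nat, pvKeys, List.map_map, List.map_map]
    apply List.map_congr_left
    intro j _
    simp only [Function.comp]
    have h40 : (40 : Int) = ((40 : Nat) : Int) := by norm_num
    rw [h40, PySem.Int.mod_natCast, PySem.List.pyGetD_natCast]
  rw [hk]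
  simp

-- residue-class partition: summing per-residue counts over range 40 recovers the full count
theorem partition_count (l : List Nat) (q : Nat → Bool) :
    ((List.range 40).map
        (fun r => (l.countP (fun j => decide (j % 40 = r) && q j) : Int))).sum
    = (l.countP q : Int) := by
  induction l with
  | nil => simp
  | cons j l ih =>
    simp only [List.countP_cons]
    have hsplit : ((List.range 40).map
        (fun r => ((l.countP (fun j => decide (j % 40 = r) && q j)
            + if decide (j % 40 = r) && q j then 1 else 0 : Nat) : Int))).sum
        = ((List.range 40).map
            (fun r => (l.countP (fun j => decide (j % 40 = r) && q j) : Int))).sum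
          + ((List.range 40).map
            (fun r => if decide (j % 40 = r) && q j then (1 : Int) else 0)).sum := by
      rw [← PySem.List.sum_map_add_int]
      apply congrArg
      apply List.map_congr_left
      intro r _
      push_cast
      split_ifs <;> simp
    rw [hsplit, ih, PySem.List.sum_map_ite_one_zero]
    by_cases hq : q j = true
    · have hc : (List.range 40).countP (fun r => decide (j % 40 = r) && q j)
          = List.count (j % 40) (List.range 40) := by
        rw [List.count_eq_countP]
        apply List.countP_congr
        intro r _
        rw [hq, Bool.and_true]
        by_cases h : j % 40 = r
        · subst h
          simp
        · simp [h, Ne.symm h]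
      have hlt : j % 40 < 40 := Nat.mod_lt _ (by norm_num)
      rw [hc, List.count_range, if_pos hlt, hq]
      rw [if_pos rfl]
      push_cast
      omega
    · simp only [Bool.not_eq_true] at hq
      simp [hq]

-- range(40) as a literal list of casts
theorem pyRange40 : PySem.List.pyRange 0 40 = (List.range 40).map (fun k : Nat => (k : Int)) := by
  decide

-- B's 40-entry lookup sum for one pattern is the cyclic count pvCnt
theorem score_eq (answers p : List Int) (hdvd : p.length ∣ 40) :
    ((PySem.List.pyRange 0 40).map
      (fun r => ((PySem.List.enumerate answers).foldl
          (fun d ia => d.modify (PySem.Int.mod ia.1 40, ia.2) 0 (fun x => x + 1))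
          PySem.Dict.empty).getD
        (r, PySem.List.pyGetD p (PySem.Int.mod r (p.length : Int)) 0) 0)).sum
    = pvCnt answers p := by
  rw [pyRange40, List.map_map]
  have hmap : ∀ r ∈ List.range 40,
      (((fun r => ((PySem.List.enumerate answers).foldl
          (fun d ia => d.modify (PySem.Int.mod ia.1 40, ia.2) 0 (fun x => x + 1))
          PySem.Dict.empty).getD
        (r, PySem.List.pyGetD p (PySem.Int.mod r (p.length : Int)) 0) 0) ∘ (fun k : Nat => (k : Int))) r)
      = ((List.range answers.length).countP
          (fun j => decide (j % 40 = r) && (answers.getD j 0 == p.getD (j % p.length) 0)) : Int) := by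
    intro r hr
    simp only [Function.comp]
    rw [PySem.Int.mod_natCast r p.length, PySem.List.pyGetD_natCast, hist_getD]
    rw [List.count_eq_countP, pvKeys, List.countP_map]
    apply congrArg (fun n : Nat => (n : Int))
    apply List.countP_congr
    intro j hj
    simp only [Function.comp]
    have hpair : ∀ (a b c d : Int), ((a, c) == (b, d)) = (a == b && c == d) :=
      fun _ _ _ _ => rfl
    have heq : (((((j % 40 : Nat) : Int)), answers.getD j 0) == (((r : Nat) : Int), p.getD (r % p.length) 0))
        = (decide (j % 40 = r) && (answers.getD j 0 == p.getD (j % p.length) 0)) := by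
      rw [hpair]
      by_cases hjr : j % 40 = r
      · subst hjr
        rw [Nat.mod_mod_of_dvd j hdvd]
        have h1 : (((j % 40 : Nat) : Int) == ((j % 40 : Nat) : Int)) = true := by simp
        rw [h1, Bool.true_and, decide_eq_true rfl, Bool.true_and]
      · have h1 : (((j % 40 : Nat) : Int) == ((r : Nat) : Int)) = false := by
          simp only [beq_eq_false_iff_ne, ne_eq, Nat.cast_inj]
          exact hjr
        rw [h1, Bool.false_and, decide_eq_false hjr, Bool.false_and]
    rw [heq]
  rw [List.map_congr_left hmap, partition_count]
  rfl

-- the 7-way cascade on (c1,c2,c3) is the filter of [1,2,3] by "score == max"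
theorem final_select (c1 c2 c3 : Int) :
    (if max (max c1 c2) c3 == c1 && max (max c1 c2) c3 == c2 && max (max c1 c2) c3 == c3 then ([1, 2, 3] : List Int)
     else if max (max c1 c2) c3 == c1 && max (max c1 c2) c3 == c2 && !(max (max c1 c2) c3 == c3) then [1, 2]
     else if max (max c1 c2) c3 == c1 && !(max (max c1 c2) c3 == c2) && max (max c1 c2) c3 == c3 then [1, 3]
     else if !(max (max c1 c2) c3 == c1) && max (max c1 c2) c3 == c2 && max (max c1 c2) c3 == c3 then [2, 3]
     else if max (max c1 c2) c3 == c1 then [1]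
     else if max (max c1 c2) c3 == c2 then [2]
     else if max (max c1 c2) c3 == c3 then [3]
     else [])
    = ([1, 2, 3] : List Int).filter
        (fun k => PySem.List.pyGetD [c1, c2, c3] (k - 1) 0 == max (max c1 c2) c3) := by
  have hmc : max (max c1 c2) c3 = c1 ∨ max (max c1 c2) c3 = c2 ∨ max (max c1 c2) c3 = c3 := by
    rcases max_choice (max c1 c2) c3 with h | h
    · rcases max_choice c1 c2 with h' | h'
      · exact Or.inl (h.trans h')
      · exact Or.inr (Or.inl (h.trans h'))
    · exact Or.inr (Or.inr h)
  set m := max (max c1 c2) c3 with hm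
  have g1 : PySem.List.pyGetD ([c1, c2, c3] : List Int) ((1 : Int) - 1) 0 = c1 := by
    norm_num [PySem.List.pyGetD_zero_cons]
  have g2 : PySem.List.pyGetD ([c1, c2, c3] : List Int) ((2 : Int) - 1) 0 = c2 := by
    norm_num [PySem.List.pyGetD_ofNat', List.getD]
  have g3 : PySem.List.pyGetD ([c1, c2, c3] : List Int) ((3 : Int) - 1) 0 = c3 := by
    norm_num [PySem.List.pyGetD_ofNat', List.getD]
  simp only [List.filter_cons, List.filter_nil, g1, g2, g3]
  simp only [Bool.and_eq_true, Bool.not_eq_true', beq_iff_eq, beq_eq_false_iff_ne]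
  rcases hmc with hh | hh | hh <;>
    split_ifs <;> first | rfl | (exfalso; omega)

-- ===== VERDICT (by name: the statement is the Claim_ definition above) =====
theorem solution_spec : Claim_equal_solution := by
  intro answers _ hpre
  have hlen : answers.length ≤ 10000 := hpre
  show solution answers = solution_alt answers
  simp only [solution, solution_alt]
  rw [triple_fold]
  rw [countP_pyRange_eq_cnt answers _ ([1,2,3,4,5] : List Int)
      (fun j hj => getD_flatten_replicate _ 2000 j (by simp; omega)),
    countP_pyRange_eq_cnt answers _ ([2,1,2,3,2,4,2,5] : List Int)
      (fun j hj => getD_flatten_replicate _ 1250 j (by simp; omega)),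
    countP_pyRange_eq_cnt answers _ ([3,3,1,1,2,2,4,4,5,5] : List Int)
      (fun j hj => getD_flatten_replicate _ 1000 j (by simp; omega))]
  rw [List.map_cons, List.map_cons, List.map_cons, List.map_nil,
    score_eq answers ([1,2,3,4,5] : List Int) (by norm_num),
    score_eq answers ([2,1,2,3,2,4,2,5] : List Int) (by norm_num),
    score_eq answers ([3,3,1,1,2,2,4,4,5,5] : List Int) (by norm_num),
    PySem.List.max?_id_cons]
  simp only [List.foldl, Option.getD_some]
  exact final_select _ _ _
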